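-- pv_equiv track=rewrite | github.com/nicolacanzonieri/access | NormalizeString.py | detect_title
-- ===== SOURCE A (Python) =====
-- def detect_title(text):
--     title = ""
--     i = 0
--     while i < len(text):
--         if text[i:i+1] == "\n":
--             break
--         else:
--             title += text[i:i+1]
--         i = i + 1
--
--     data = text[i:]
--     data_array = [title, data]
--     return data_array
-- ===== SOURCE B (Python) =====
-- def detect_title(text):
--     before, sep, after = text.partition("\n")
--     return [before, sep + after]
-- ===== Notes on version B (the rewrite author's own statement) =====
-- stated objective: idiomatic
-- what changed: Replaced the manual index loop with per-character string concatenation by a single str.partition call, returning [before, sep + after].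
import Mathlib
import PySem

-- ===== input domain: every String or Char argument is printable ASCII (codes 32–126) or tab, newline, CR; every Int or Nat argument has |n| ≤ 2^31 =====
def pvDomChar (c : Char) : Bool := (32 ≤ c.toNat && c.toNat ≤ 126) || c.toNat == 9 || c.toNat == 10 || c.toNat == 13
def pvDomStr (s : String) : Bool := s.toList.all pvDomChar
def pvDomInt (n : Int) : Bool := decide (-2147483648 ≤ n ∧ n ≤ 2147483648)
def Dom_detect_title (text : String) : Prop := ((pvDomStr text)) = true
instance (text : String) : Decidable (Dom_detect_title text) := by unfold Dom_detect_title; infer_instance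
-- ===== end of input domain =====

-- B replaces A's index loop with per-character concatenation by a single str.partition call (idiomatic).

-- ===== PORT A =====
-- A's while loop: accumulate title char by char until the first '\n'; data = the remainder from i on.
def detectTitleLoop (cs : List Char) (title : List Char) : List Char × List Char :=
  match cs with
  | [] => (title, [])
  | c :: rest => if c = '\n' then (title, c :: rest) else detectTitleLoop rest (title ++ [c])

def detect_title (text : String) : List String :=
  let p := detectTitleLoop text.toList []
  [String.mk p.1, String.mk p.2]

-- ===== PORT B =====
-- Source B: before, sep, after = text.partition("\n"); return [before, sep + after].
-- partition on a 1-char separator = span at the first '\n'; sep + after is exactly the suffix.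
def detect_title_alt (text : String) : List String :=
  let p := text.toList.span (· != '\n')
  [String.mk p.1, String.mk p.2]

-- ===== PRECONDITION & SPEC =====
def Spec_detect_title (text : String) (out : List String) : Prop := out = detect_title_alt text
instance (text : String) (out : List String) : Decidable (Spec_detect_title text out) := by unfold Spec_detect_title; infer_instance

-- ===== CLAIM (what is proved, stated in full; the proofs are below) =====
def Claim_equal_detect_title : Prop := ∀ (text : String), Dom_detect_title text → Spec_detect_title text (detect_title text)

-- ===== LEMMAS AND PROOFS =====
theorem detectTitleLoop_eq (cs : List Char) (acc : List Char) :
    detectTitleLoop cs acc = (acc ++ cs.takeWhile (· != '\n'), cs.dropWhile (· != '\n')) := by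
  induction cs generalizing acc with
  | nil => simp [detectTitleLoop]
  | cons c rest ih =>
    by_cases h : c = '\n'
    · simp [detectTitleLoop, h, List.takeWhile, List.dropWhile]
    · have hb : (c != '\n') = true := by simp [h]
      simp [detectTitleLoop, h, ih, List.takeWhile_cons, hb]

-- ===== VERDICT (by name: the statement is the Claim_ definition above) =====
theorem detect_title_spec : Claim_equal_detect_title := by
  intro text _
  unfold Spec_detect_title detect_title detect_title_alt
  simp [detectTitleLoop_eq, List.span_eq_takeWhile_dropWhile]
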